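-- pv_equiv track=rewrite | github.com/Dimitr1us/interpreted-programming-languages | Lab1_task1_func3.py | func
-- ===== SOURCE A (Python) =====
-- def coprime(a,b):
--     minimum=min(a,b)
--     for d in range(2,minimum):
--         if (a%d==0 and b%d==0):
--             return False
--     return True
--
-- def func(n):
--     min_d=1
--     for d in range(2,n):
--         if (n%d==0):
--             min_d=d
--             break
--     max_d=0
--     for i in range(2,n):
--         if (coprime(i,n)==False and (i%min_d!=0 or min_d==1)):
--             max_d=i
--
--     sum=0
--     while (n>0):
--         a=n%10
--         if (a<5): sum+=a
--         n=n//10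
--
--     return sum*max_d
-- ===== SOURCE B (Python) =====
-- def _gcd(a, b):
--     while b:
--         a, b = b, a % b
--     return a
--
-- def _small_digit_sum(n):
--     # sum of the decimal digits of n that are < 5
--     if n <= 0:
--         return 0
--     a = n % 10
--     return (a if a < 5 else 0) + _small_digit_sum(n // 10)
--
-- def func(n):
--     # smallest factor of n in [2, sqrt(n)]; 1 when n is prime or too small
--     min_d = 1
--     d = 2
--     while d * d <= n:
--         if n % d == 0:
--             min_d = d
--             break
--         d += 1
--     # largest i below n sharing a factor with n, skipping multiples of min_d
--     max_d = 0
--     for i in reversed(range(2, n)):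
--         if _gcd(i, n) > 1 and (i % min_d != 0 or min_d == 1):
--             max_d = i
--             break
--     return _small_digit_sum(n) * max_d
-- ===== Notes on version B (the rewrite author's own statement) =====
-- stated objective: faster
-- what changed: min_d is found by trial division only up to the square root instead of scanning the whole range; the quadratic coprime() inner scan is replaced by a Euclid gcd test; max_d is found by scanning the range downward and breaking at the first hit instead of folding upward over all of it; the digit sum is a plain recursion instead of a while loop.
-- intended difference: On n twice an odd prime p that has a decimal digit in 1..4, A's coprime() scans d only up to min(a,b) exclusive and so never sees the common factor p itself, making A report no non-coprime number below n and return 0, while B's gcd test finds p and returns digitsum*p, the intended largest number sharing a factor with n. — e.g. on func(10): A returns 0, B returns 5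
import Mathlib
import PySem

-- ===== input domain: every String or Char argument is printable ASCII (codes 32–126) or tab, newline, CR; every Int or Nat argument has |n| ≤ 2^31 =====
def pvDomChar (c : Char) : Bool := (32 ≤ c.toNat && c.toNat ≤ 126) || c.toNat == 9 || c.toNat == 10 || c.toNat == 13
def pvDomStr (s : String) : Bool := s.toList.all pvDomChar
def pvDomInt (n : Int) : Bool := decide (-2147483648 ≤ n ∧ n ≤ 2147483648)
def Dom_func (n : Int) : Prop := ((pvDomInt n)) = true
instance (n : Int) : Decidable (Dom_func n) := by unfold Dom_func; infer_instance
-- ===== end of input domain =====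

-- B finds min_d by sqrt-bounded trial division, tests shared factors via Euclid's gcd, scans
-- downward with early break for max_d, and sums small digits recursively, replacing A's quadratic
-- double loop. On n = 2*odd-prime with a digit in 1..4 (D_func) A's coprime() misses the shared
-- factor n/2 and returns 0 while B returns the digit sum times n/2.


-- ===== PORT A =====
-- coprime(a,b): returns False iff some d in range(2, min(a,b)) divides both
def coprime (a b : Int) : Bool :=
  (PySem.List.pyRange 2 (min a b) 1).all
    (fun d => !(PySem.Int.mod a d == 0 && PySem.Int.mod b d == 0))

-- the 'while n>0' digit loop of A, with the running accumulator 'sum'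
-- (fuel is only a structural totality guard: n shrinks strictly, so n.toNat steps suffice)
def funcSumLoop : Nat → Int → Int → Int
  | 0, s, _ => s
  | fuel + 1, s, n =>
    if 0 < n then
      funcSumLoop fuel (if PySem.Int.mod n 10 < 5 then s + PySem.Int.mod n 10 else s)
        (PySem.Int.floordiv n 10)
    else s

def func (n : Int) : Int :=
  -- first loop with break: first divisor of n in range(2, n), else 1
  let min_d := ((PySem.List.pyRange 2 n 1).find? (fun d => PySem.Int.mod n d == 0)).getD 1
  -- second loop: keep overwriting max_d on every hit
  let max_d := (PySem.List.pyRange 2 n 1).foldl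
    (fun acc i =>
      if (coprime i n == false) && (!(PySem.Int.mod i min_d == 0) || min_d == 1)
      then i else acc) 0
  funcSumLoop n.toNat 0 n * max_d

-- ===== PORT B =====
-- min_d: smallest factor searched only up to sqrt(n); 1 if none (fuel = totality guard)
def spfLoop : Nat → Int → Int → Int
  | 0, _, _ => 1
  | fuel + 1, n, d =>
    if d * d ≤ n then
      if PySem.Int.mod n d == 0 then d else spfLoop fuel n (d + 1)
    else 1

def spf (n : Int) : Int := spfLoop n.toNat n 2

-- _gcd(a,b): Euclid with Python's % (fuel = totality guard, |b| shrinks strictly)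
def gcdLoop : Nat → Int → Int → Int
  | 0, a, _ => a
  | fuel + 1, a, b =>
    if b ≠ 0 then gcdLoop fuel b (PySem.Int.mod a b) else a

def gcdI (a b : Int) : Int := gcdLoop (b.natAbs + 1) a b

-- _small_digit_sum(n): recursive sum of the digits < 5 (fuel = totality guard)
def digitsB : Nat → Int → Int
  | 0, _ => 0
  | fuel + 1, n =>
    if n ≤ 0 then 0
    else (if PySem.Int.mod n 10 < 5 then PySem.Int.mod n 10 else 0)
         + digitsB fuel (PySem.Int.floordiv n 10)

def func_alt (n : Int) : Int :=
  let min_d := spf n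
  -- downward scan with break: first i from the top sharing a factor with n
  let max_d := ((PySem.List.pyRange 2 n 1).reverse.find?
    (fun i => decide (1 < gcdI i n)
        && (!(PySem.Int.mod i min_d == 0) || min_d == 1))).getD 0
  digitsB n.toNat n * max_d

-- ===== PRECONDITION & SPEC =====
-- On n twice an odd prime p with a decimal digit in 1..4, A's coprime() scans d only below
-- min(a,b) and so never sees the common factor p itself: A finds no non-coprime number below n
-- and returns 0, while B's gcd test finds p and returns digitsum*p, the intended value.
def D_func (n : Int) : Prop :=
  0 < n ∧ n % 4 = 2 ∧ Nat.Prime (n.toNat / 2) ∧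
    ∃ d ∈ Nat.digits 10 n.toNat, 1 ≤ d ∧ d ≤ 4
instance (n : Int) : Decidable (D_func n) := by unfold D_func; infer_instance

def Spec_func (n : Int) (out : Int) : Prop := ¬ D_func n → out = func_alt n
instance (n : Int) (out : Int) : Decidable (Spec_func n out) := by unfold Spec_func; infer_instance

def pvDiffWitness_func : Int := 10
def pvDiffWitnessOut_func : Int × Int := (0, 5)

-- ===== CLAIM (what is proved, stated in full; the proofs are below) =====
def Claim_unchanged_func : Prop := ∀ (n : Int), Dom_func n → Spec_func n (func n)
def Claim_changed_func : Prop := Dom_func (pvDiffWitness_func) ∧ D_func (pvDiffWitness_func) ∧ func (pvDiffWitness_func) = pvDiffWitnessOut_func.1 ∧ func_alt (pvDiffWitness_func) = pvDiffWitnessOut_func.2 ∧ pvDiffWitnessOut_func.1 ≠ pvDiffWitnessOut_func.2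
def Claim_exact_func : Prop := ∀ (n : Int), Dom_func n → D_func n → func n ≠ func_alt n

-- ===== LEMMAS AND PROOFS =====

-- B's sqrt-bounded search equals A's full-range first-divisor search
lemma spfLoop_eq (n : Int) :
    ∀ (fuel : Nat) (d : Int), (n + 1 - d).toNat ≤ fuel → 2 ≤ d →
      (∀ e : Int, 2 ≤ e → e < d → ¬ e ∣ n) →
      spfLoop fuel n d =
        ((PySem.List.pyRange d n 1).find? (fun x => PySem.Int.mod n x == 0)).getD 1 := by
  intro fuel
  induction fuel with
  | zero =>
    intro d hk hd2 _
    have hnd : n < d := by omega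
    rw [spfLoop, PySem.List.pyRange_one_eq_nil (by omega)]
    rfl
  | succ fuel ih =>
    intro d hk hd2 hinv
    rw [spfLoop]
    by_cases hdd : d * d ≤ n
    · have hdn : d < n := by nlinarith
      rw [if_pos hdd, PySem.List.pyRange_one_cons hdn]
      cases hm : (PySem.Int.mod n d == 0) with
      | true => simp [List.find?, hm]
      | false =>
        simp only [hm, Bool.false_eq_true, if_false, List.find?, Bool.false_eq_true]
        have hnd : ¬ d ∣ n := by
          intro hdvd
          have := (PySem.Int.mod_eq_zero_iff_dvd n d).mpr hdvd
          simp [this] at hm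
        exact ih (d + 1) (by omega) (by omega)
          (fun e he2 helt => by
            by_cases he : e < d
            · exact hinv e he2 he
            · have : e = d := by omega
              subst this; exact hnd)
    · rw [if_neg hdd]
      have hnone : (PySem.List.pyRange d n 1).find? (fun x => PySem.Int.mod n x == 0) = none := by
        apply List.find?_eq_none.mpr
        intro x hx
        obtain ⟨hxd, hxn⟩ := (PySem.List.mem_pyRange_one).mp hx
        simp only [beq_iff_eq]
        intro hmod
        have hxdvd : x ∣ n := (PySem.Int.mod_eq_zero_iff_dvd n x).mp hmod
        obtain ⟨c, hc⟩ := hxdvd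
        have hxpos : 0 < x := by omega
        have hnpos : 0 < n := by omega
        have hcpos : 0 < c := by nlinarith
        have hcne1 : c ≠ 1 := by
          intro h1; rw [h1, mul_one] at hc; omega
        have hcd : c < d := by nlinarith
        exact hinv c (by omega) hcd ⟨x, by rw [hc]; ring⟩
      rw [hnone]
      rfl

lemma min_d_eq (n : Int) :
    spf n = ((PySem.List.pyRange 2 n 1).find? (fun d => PySem.Int.mod n d == 0)).getD 1 := by
  exact spfLoop_eq n n.toNat 2 (by omega) (by omega) (fun e he2 helt => by omega)

-- first-match characterisation of find? over an ascending range
lemma find?_pyRange_some {p : Int → Bool} :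
    ∀ (k : Nat) (a b q : Int), (b - a).toNat = k →
      (PySem.List.pyRange a b 1).find? p = some q →
      a ≤ q ∧ q < b ∧ p q = true ∧ ∀ e, a ≤ e → e < q → p e = false := by
  intro k
  induction k using Nat.strong_induction_on with
  | _ k ih =>
    intro a b q hk hf
    by_cases hab : b ≤ a
    · rw [PySem.List.pyRange_one_eq_nil hab] at hf
      simp at hf
    · rw [PySem.List.pyRange_one_cons (by omega), List.find?_cons] at hf
      cases hpa : p a with
      | true =>
        rw [hpa] at hf
        simp only [Option.some.injEq] at hf
        subst hf
        exact ⟨le_refl _, by omega, hpa, fun e he1 he2 => by omega⟩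
      | false =>
        rw [hpa] at hf
        obtain ⟨h1, h2, h3, h4⟩ := ih (b - (a+1)).toNat (by omega) (a+1) b q rfl hf
        refine ⟨by omega, h2, h3, fun e he1 he2 => ?_⟩
        by_cases he : a + 1 ≤ e
        · exact h4 e he he2
        · have : e = a := by omega
          subst this; exact hpa

-- characterisation of spf n: either no divisor in [2,n) at all, or the least one
lemma spf_cases (n : Int) :
    (spf n = 1 ∧ ∀ e : Int, 2 ≤ e → e < n → ¬ e ∣ n) ∨
    (2 ≤ spf n ∧ spf n < n ∧ spf n ∣ n ∧
      ∀ e : Int, 2 ≤ e → e < spf n → ¬ e ∣ n) := by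
  rw [min_d_eq n]
  cases hf : (PySem.List.pyRange 2 n 1).find? (fun d => PySem.Int.mod n d == 0) with
  | none =>
    left
    refine ⟨by simp, fun e he2 hen hdvd => ?_⟩
    have := List.find?_eq_none.mp hf e ((PySem.List.mem_pyRange_one).mpr ⟨he2, hen⟩)
    rw [(PySem.Int.mod_eq_zero_iff_dvd n e).mpr hdvd] at this
    simp at this
  | some q =>
    right
    obtain ⟨h1, h2, h3, h4⟩ := find?_pyRange_some (n - 2).toNat 2 n q rfl hf
    simp only [beq_iff_eq] at h3
    simp only [Option.getD_some]
    refine ⟨h1, h2, (PySem.Int.mod_eq_zero_iff_dvd n q).mp h3, fun e he2 heq hdvd => ?_⟩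
    have := h4 e he2 heq
    rw [(PySem.Int.mod_eq_zero_iff_dvd n e).mpr hdvd] at this
    simp at this

-- gcdLoop is a greatest common divisor on nonnegative inputs (given enough fuel)
lemma gcdLoop_props : ∀ (fuel : Nat) (b a : Int), b.natAbs < fuel → 0 ≤ a → 0 ≤ b →
    0 ≤ gcdLoop fuel a b ∧ gcdLoop fuel a b ∣ a ∧ gcdLoop fuel a b ∣ b ∧
      ∀ d : Int, d ∣ a → d ∣ b → d ∣ gcdLoop fuel a b := by
  intro fuel
  induction fuel with
  | zero => intro b a hk _ _; omega
  | succ fuel ih =>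
    intro b a hk ha hb
    rw [gcdLoop]
    by_cases h : b ≠ 0
    · have hbpos : 0 < b := by omega
      have hr0 : 0 ≤ PySem.Int.mod a b := PySem.Int.mod_nonneg a hbpos
      have hrlt : PySem.Int.mod a b < b := PySem.Int.mod_lt a hbpos
      obtain ⟨h0, h1, h2, h3⟩ := ih (PySem.Int.mod a b) b (by omega) hb hr0
      have hsum := PySem.Int.floordiv_mul_add_mod a b
      rw [if_pos h]
      refine ⟨h0, ?_, h1, ?_⟩
      · have : gcdLoop fuel b (PySem.Int.mod a b) ∣ PySem.Int.floordiv a b * b + PySem.Int.mod a b :=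
          dvd_add (Dvd.dvd.mul_left h1 _) h2
        rwa [hsum] at this
      · intro d hda hdb
        apply h3 d hdb
        have : d ∣ a - PySem.Int.floordiv a b * b := dvd_sub hda (Dvd.dvd.mul_left hdb _)
        have heq : a - PySem.Int.floordiv a b * b = PySem.Int.mod a b := by omega
        rwa [heq] at this
    · rw [if_neg h]
      simp only [not_not] at h
      subst h
      exact ⟨ha, dvd_refl a, dvd_zero a, fun d hda _ => hda⟩

lemma gcdI_props (a b : Int) (ha : 0 ≤ a) (hb : 0 ≤ b) :
    0 ≤ gcdI a b ∧ gcdI a b ∣ a ∧ gcdI a b ∣ b ∧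
      ∀ d : Int, d ∣ a → d ∣ b → d ∣ gcdI a b :=
  gcdLoop_props (b.natAbs + 1) b a (by omega) ha hb

-- coprime i n = false iff there is a common divisor 2 ≤ d < i (for 2 ≤ i ≤ n)
lemma coprime_false_iff (i n : Int) (_hi : 2 ≤ i) (hin : i ≤ n) :
    coprime i n = false ↔ ∃ d : Int, 2 ≤ d ∧ d < i ∧ d ∣ i ∧ d ∣ n := by
  unfold coprime
  rw [min_eq_left hin, Bool.eq_false_iff, ne_eq, List.all_eq_true]
  simp only [PySem.List.mem_pyRange_one, Bool.not_eq_true', Bool.not_eq_false,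
    Bool.and_eq_true, beq_iff_eq, not_forall]
  constructor
  · rintro ⟨d, ⟨hd2, hdi⟩, h1, h2⟩
    exact ⟨d, hd2, hdi, (PySem.Int.mod_eq_zero_iff_dvd i d).mp h1,
      (PySem.Int.mod_eq_zero_iff_dvd n d).mp h2⟩
  · rintro ⟨d, hd2, hdi, hdvi, hdvn⟩
    exact ⟨d, ⟨hd2, hdi⟩, (PySem.Int.mod_eq_zero_iff_dvd i d).mpr hdvi,
      (PySem.Int.mod_eq_zero_iff_dvd n d).mpr hdvn⟩

-- odd numbers are coprime to 2 (Bezout witness)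
lemma isCoprime_two_of_odd (x : Int) (h : x % 2 = 1) : IsCoprime x 2 := by
  refine ⟨1, -(x / 2), ?_⟩
  have := Int.mul_ediv_add_emod x 2
  ring_nf
  omega

-- last hit of an upward fold = first hit of the reversed scan
lemma foldl_pick_eq_reverse_find (p : Int → Bool) :
    ∀ (L : List Int) (a : Int),
      L.foldl (fun acc i => if p i then i else acc) a = ((L.reverse.find? p).getD a) := by
  intro L
  induction L with
  | nil => intro a; rfl
  | cons x xs ih =>
    intro a
    rw [List.foldl_cons, ih, List.reverse_cons, List.find?_append]
    cases h : xs.reverse.find? p with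
    | some y => rfl
    | none =>
      cases hx : p x <;> simp [hx, List.find?]

-- on a strictly descending list, if pA implies pB and every pB-hit is dominated by
-- a pA-hit at least as large, then the two first hits coincide
lemma find?_eq_of_dominated (pA pB : Int → Bool) :
    ∀ (R : List Int), R.Pairwise (· > ·) →
      (∀ x ∈ R, pA x = true → pB x = true) →
      (∀ x ∈ R, pB x = true → ∃ y ∈ R, x ≤ y ∧ pA y = true) →
      R.find? pB = R.find? pA := by
  intro R
  induction R with
  | nil => intro _ _ _; rfl
  | cons x xs ih =>
    intro hsort h1 h2
    rw [List.find?_cons, List.find?_cons]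
    cases hbx : pB x with
    | true =>
      obtain ⟨y, hy, hxy, hay⟩ := h2 x (by simp) hbx
      have hyx : y = x := by
        rcases List.mem_cons.mp hy with h | h
        · exact h
        · have := (List.pairwise_cons.mp hsort).1 y h
          omega
      subst hyx
      rw [hay]
    | false =>
      have hax : pA x = false := by
        cases hA : pA x with
        | false => rfl
        | true => rw [h1 x (by simp) hA] at hbx; exact hbx
      rw [hax]
      apply ih (List.pairwise_cons.mp hsort).2
        (fun z hz hA => h1 z (by simp [hz]) hA)
      intro z hz hB
      obtain ⟨y, hy, hzy, hay⟩ := h2 z (by simp [hz]) hB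
      rcases List.mem_cons.mp hy with h | h
      · subst h; rw [hay] at hax; exact absurd hax (by simp)
      · exact ⟨y, h, hzy, hay⟩

-- digitsB vanishes on nonpositive input
lemma digitsB_of_nonpos (fuel : Nat) (n : Int) (h : n ≤ 0) : digitsB fuel n = 0 := by
  cases fuel with
  | zero => rfl
  | succ fuel => rw [digitsB, if_pos h]

lemma digitsB_nonneg (fuel : Nat) (n : Int) : 0 ≤ digitsB fuel n := by
  induction fuel generalizing n with
  | zero => exact le_refl 0
  | succ fuel ih =>
    rw [digitsB]
    have h10 := PySem.Int.mod_nonneg n (by norm_num : (0:Int) < 10)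
    have := ih (PySem.Int.floordiv n 10)
    split_ifs <;> omega

-- digitsB n ≠ 0 exactly when n is positive with a decimal digit in 1..4
lemma digitsB_ne_zero_iff (fuel : Nat) (n : Int) (hn : 0 < n) (hfuel : n.toNat ≤ fuel) :
    digitsB fuel n ≠ 0 ↔ ∃ d ∈ Nat.digits 10 n.toNat, 1 ≤ d ∧ d ≤ 4 := by
  induction fuel generalizing n with
  | zero => omega
  | succ fuel ih =>
    rw [digitsB, if_neg (by omega)]
    rw [PySem.Int.mod_eq_emod_of_pos (by norm_num : (0:Int) < 10),
      PySem.Int.floordiv_eq_ediv_of_pos (by norm_num : (0:Int) < 10)]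
    rw [Nat.digits_def' (by norm_num : 1 < 10) (by omega : 0 < n.toNat)]
    have hmodcast : n.toNat % 10 = (n % 10).toNat := by omega
    have hdivcast : n.toNat / 10 = (n / 10).toNat := by omega
    have hm0 : 0 ≤ n % 10 := by omega
    have hm10 : n % 10 < 10 := by omega
    by_cases hq : 0 < n / 10
    · have hih := ih (n / 10) hq (by omega)
      have hd0 := digitsB_nonneg fuel (n / 10)
      simp only [List.mem_cons]
      constructor
      · intro hne
        by_cases hh : (if n % 10 < 5 then n % 10 else 0) ≠ 0
        · refine ⟨n.toNat % 10, Or.inl rfl, by clear hih hd0 hne; split_ifs at hh <;> omega⟩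
        · simp only [ne_eq, not_not] at hh
          rw [hh, zero_add] at hne
          obtain ⟨d, hd, hd14⟩ := hih.mp hne
          exact ⟨d, Or.inr (hdivcast ▸ hd), hd14⟩
      · rintro ⟨d, hd | hd, hd14⟩
        · subst hd
          have : (if n % 10 < 5 then n % 10 else 0) ≠ 0 := by split_ifs <;> omega
          split_ifs at this ⊢ <;> omega
        · have := hih.mpr ⟨d, hdivcast ▸ hd, hd14⟩
          split_ifs <;> omega
    · have hq0 : n / 10 = 0 := by omega
      rw [hq0, digitsB_of_nonpos fuel 0 (le_refl 0)]
      have : Nat.digits 10 (n.toNat / 10) = [] := by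
        rw [show n.toNat / 10 = 0 by omega]; rfl
      rw [this]
      simp only [add_zero, List.mem_cons, List.not_mem_nil, or_false]
      constructor
      · intro hne
        exact ⟨n.toNat % 10, rfl, by split_ifs at hne <;> omega⟩
      · rintro ⟨d, hd, hd14⟩
        subst hd
        split_ifs <;> omega

-- A's accumulator loop equals B's recursion, fuel for fuel
lemma sumLoop_eq (fuel : Nat) : ∀ (s n : Int), funcSumLoop fuel s n = s + digitsB fuel n := by
  induction fuel with
  | zero => intro s n; rw [funcSumLoop, digitsB]; ring
  | succ fuel ih =>
    intro s n
    rw [funcSumLoop, digitsB]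
    by_cases h : 0 < n
    · rw [if_pos h, if_neg (by omega : ¬ n ≤ 0), ih]
      split_ifs <;> ring
    · rw [if_neg h, if_pos (by omega : n ≤ 0)]
      ring

-- THE DOMINATION LEMMA: outside the 2*odd-prime case, every gcd-hit that A's
-- proper-common-divisor test misses is dominated by a larger hit A does see
lemma dominate (n q i : Int)
    (hq2 : 2 ≤ q) (hqn : q ∣ n) (hqmin : ∀ e : Int, 2 ≤ e → e < q → ¬ e ∣ n)
    (hnD : ¬ (n % 4 = 2 ∧ Nat.Prime (n.toNat / 2)))
    (hi : 2 ≤ i) (hin : i < n)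
    (hg : 1 < gcdI i n) (hfil : ¬ q ∣ i) :
    ∃ y : Int, 2 ≤ y ∧ y < n ∧ i ≤ y ∧ coprime y n = false ∧ ¬ q ∣ y := by
  obtain ⟨hg0, hgi, hgn, _⟩ := gcdI_props i n (by omega) (by omega)
  by_cases hA : ∃ d : Int, 2 ≤ d ∧ d < i ∧ d ∣ i ∧ d ∣ n
  · exact ⟨i, hi, hin, le_refl i,
      (coprime_false_iff i n hi (by omega)).mpr hA, hfil⟩
  · -- gcd = i, i divides n, i has no proper divisor ≥ 2
    have hgle : gcdI i n ≤ i := Int.le_of_dvd (by omega) hgi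
    have hgeq : gcdI i n = i := by
      by_contra hne
      exact hA ⟨gcdI i n, by omega, by omega, hgi, hgn⟩
    rw [hgeq] at hgn
    have hnodiv : ∀ d : Int, 2 ≤ d → d < i → ¬ d ∣ i := by
      intro d hd2 hdi hdvd
      exact hA ⟨d, hd2, hdi, hdvd, dvd_trans hdvd hgn⟩
    have hqi : q < i := by
      rcases lt_trichotomy i q with h | h | h
      · exact absurd hgn (hqmin i hi h)
      · exact absurd (h ▸ dvd_refl i) hfil
      · exact h
    have hidvdn : i ∣ n := hgn
    obtain ⟨m, hm⟩ := hidvdn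
    have hm2 : 2 ≤ m := by nlinarith
    by_cases hq2' : q = 2
    · subst hq2'
      have hiodd : i % 2 = 1 := by
        rcases Int.emod_two_eq i with h | h
        · exact absurd (by omega : (2:Int) ∣ i) hfil
        · exact h
      have hmeven : (2:Int) ∣ m := by
        have h2n : (2:Int) ∣ i * m := hm ▸ hqn
        exact (isCoprime_two_of_odd i hiodd).symm.dvd_of_dvd_mul_left h2n
      by_cases hm2' : m = 2
      · -- n = 2 * i with i an odd prime: exactly the excluded region
        exfalso
        subst hm2'
        apply hnD
        constructor
        · omega
        · have hieq : n.toNat / 2 = i.toNat := by omega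
          rw [hieq]
          rw [Nat.prime_def_lt]
          refine ⟨by omega, fun d hd hdvd => ?_⟩
          by_contra hd1
          have hd0 : d ≠ 0 := by
            rintro rfl
            rw [Nat.zero_dvd] at hdvd
            omega
          have : (d : Int) ∣ i := by
            have := Int.natCast_dvd_natCast.mpr hdvd
            rwa [Int.toNat_of_nonneg (by omega : (0:Int) ≤ i)] at this
          exact hnodiv d (by omega) (by omega) this
      · have hm4 : 4 ≤ m := by omega
        refine ⟨3 * i, by omega, by nlinarith, by omega, ?_, by omega⟩
        exact (coprime_false_iff (3 * i) n (by omega) (by nlinarith)).mpr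
          ⟨i, hi, by omega, ⟨3, by ring⟩, hgn⟩
    · have hq3 : 3 ≤ q := by omega
      have hnodd : n % 2 = 1 := by
        rcases Int.emod_two_eq n with h | h
        · exact absurd (by omega : (2:Int) ∣ n) (hqmin 2 (le_refl 2) (by omega))
        · exact h
      have hm3 : 3 ≤ m := by
        by_contra h
        have : m = 2 := by omega
        subst this
        omega
      refine ⟨2 * i, by omega, by nlinarith, by omega, ?_, ?_⟩
      · exact (coprime_false_iff (2 * i) n (by omega) (by nlinarith)).mpr
          ⟨i, hi, by omega, ⟨2, by ring⟩, hgn⟩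
      · intro hq2i
        have hqodd : q % 2 = 1 := by
          rcases Int.emod_two_eq q with h | h
          · exfalso
            have : (2:Int) ∣ n := dvd_trans (by omega) hqn
            omega
          · exact h
        exact hfil ((isCoprime_two_of_odd q hqodd).dvd_of_dvd_mul_left hq2i)

-- the main equality outside D
lemma func_eq_of_notD (n : Int) (hnD : ¬ D_func n) : func n = func_alt n := by
  simp only [func, func_alt]
  rw [← min_d_eq n, sumLoop_eq n.toNat 0 n, zero_add]
  rw [foldl_pick_eq_reverse_find]
  by_cases hdig : digitsB n.toNat n = 0
  · rw [hdig]; ring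
  · have hn : 0 < n := by
      by_contra h
      exact hdig (digitsB_of_nonpos n.toNat n (by omega))
    have hsd := (digitsB_ne_zero_iff n.toNat n hn (le_refl _)).mp hdig
    congr 1
    congr 1
    refine Eq.symm ?_
    apply find?_eq_of_dominated
    · rw [List.pairwise_reverse]
      exact PySem.List.pairwise_lt_pyRange_one 2 n
    · -- pA implies pB
      intro x hx hA
      obtain ⟨hx2, hxn⟩ := (PySem.List.mem_pyRange_one).mp (List.mem_reverse.mp hx)
      simp only [Bool.and_eq_true, beq_iff_eq] at hA ⊢
      obtain ⟨hcop, hfil⟩ := hA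
      refine ⟨?_, hfil⟩
      obtain ⟨d, hd2, hdx, hdvx, hdvn⟩ :=
        (coprime_false_iff x n hx2 (by omega)).mp hcop
      obtain ⟨hg0, hgx, hgn', hgd⟩ := gcdI_props x n (by omega) (by omega)
      have hdg : d ∣ gcdI x n := hgd d hdvx hdvn
      have hgpos : 0 < gcdI x n := by
        rcases lt_or_eq_of_le hg0 with h | h
        · exact h
        · exfalso; rw [← h, zero_dvd_iff] at hgx; omega
      have := Int.le_of_dvd hgpos hdg
      simp only [decide_eq_true_eq]
      omega
    · -- every pB-hit is dominated
      intro x hx hB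
      obtain ⟨hx2, hxn⟩ := (PySem.List.mem_pyRange_one).mp (List.mem_reverse.mp hx)
      simp only [Bool.and_eq_true, decide_eq_true_eq, Bool.or_eq_true,
        Bool.not_eq_true', beq_iff_eq, beq_eq_false_iff_ne] at hB
      obtain ⟨hg, hfil⟩ := hB
      rcases spf_cases n with ⟨hq1, hnone⟩ | ⟨hq2, hqn', hqdvd, hqmin⟩
      · -- no divisor of n below n at all: gcd must be 1, contradiction
        exfalso
        obtain ⟨hg0, hgx, hgn', _⟩ := gcdI_props x n (by omega) (by omega)
        have hgle : gcdI x n ≤ x := Int.le_of_dvd (by omega) hgx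
        exact hnone (gcdI x n) (by omega) (by omega) hgn'
      · have hfil' : ¬ spf n ∣ x := by
          rcases hfil with h | h
          · intro hdvd
            exact h ((PySem.Int.mod_eq_zero_iff_dvd x (spf n)).mpr hdvd)
          · omega
        have hnD' : ¬ (n % 4 = 2 ∧ Nat.Prime (n.toNat / 2)) := by
          intro ⟨h1, h2⟩
          exact hnD ⟨hn, h1, h2, hsd⟩
        obtain ⟨y, hy2, hyn, hxy, hcop, hynd⟩ :=
          dominate n (spf n) x hq2 hqdvd hqmin hnD' hx2 hxn hg hfil'
        refine ⟨y, List.mem_reverse.mpr ((PySem.List.mem_pyRange_one).mpr ⟨hy2, hyn⟩),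
          hxy, ?_⟩
        simp only [Bool.and_eq_true, beq_iff_eq, Bool.or_eq_true, Bool.not_eq_true',
          beq_eq_false_iff_ne]
        refine ⟨by rw [hcop], Or.inl ?_⟩
        intro hmod
        exact hynd ((PySem.Int.mod_eq_zero_iff_dvd y (spf n)).mp hmod)

-- ===== VERDICT (by name: the statements are the Claim_ definitions above) =====
theorem func_spec : Claim_unchanged_func := by
  intro n _ hnD
  exact func_eq_of_notD n hnD

theorem func_changed : Claim_changed_func := by
  unfold Claim_changed_func; decide

theorem func_tight : Claim_exact_func := by
  intro n _ hD
  obtain ⟨hn, h4, hp, hsd⟩ := hD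
  have hp2 : 2 ≤ n.toNat / 2 := hp.two_le
  -- p := n / 2 is an odd prime, n = 2 * p
  set p : Int := n / 2 with hpdef
  have hpcast : (↑(n.toNat / 2) : Int) = p := by omega
  have hn2p : n = 2 * p := by omega
  have hpodd : p % 2 = 1 := by omega
  have hp3 : 3 ≤ p := by omega
  have hn6 : 6 ≤ n := by omega
  -- spf n = 2
  have hspf2 : spf n = 2 := by
    rcases spf_cases n with ⟨h1, hnone⟩ | ⟨hq2, hqn', hqdvd, hqmin⟩
    · exact absurd (by omega : (2:Int) ∣ n) (hnone 2 (le_refl 2) (by omega))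
    · by_contra hne
      exact hqmin 2 (le_refl 2) (by omega) (by omega)
  have hdigpos : 0 < digitsB n.toNat n := by
    have h0 := digitsB_nonneg n.toNat n
    have := (digitsB_ne_zero_iff n.toNat n hn (le_refl _)).mpr hsd
    omega
  simp only [func, func_alt]
  rw [← min_d_eq n, sumLoop_eq n.toNat 0 n, zero_add, foldl_pick_eq_reverse_find, hspf2]
  -- A finds no hit at all
  have hAnone : ((PySem.List.pyRange 2 n 1).reverse.find?
      (fun i => (coprime i n == false) && (!(PySem.Int.mod i 2 == 0) || (2:Int) == 1))) = none := by
    apply List.find?_eq_none.mpr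
    intro x hx
    obtain ⟨hx2, hxn⟩ := (PySem.List.mem_pyRange_one).mp (List.mem_reverse.mp hx)
    simp only [Bool.and_eq_true, beq_iff_eq, Bool.or_eq_true, Bool.not_eq_true',
      beq_eq_false_iff_ne, not_and, not_or]
    intro hcop
    obtain ⟨d, hd2, hdx, hdvx, hdvn⟩ := (coprime_false_iff x n hx2 (by omega)).mp hcop
    constructor
    · -- x must be odd, yet its witness divisor d would have to be p, forcing x ≥ 2p
      intro hxodd
      exfalso
      have hxodd' : x % 2 = 1 := by
        rw [PySem.Int.mod_eq_emod_of_pos (by norm_num : (0:Int) < 2)] at hxodd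
        omega
      have hdodd : d % 2 = 1 := by
        rcases Int.emod_two_eq d with h | h
        · exfalso
          have : (2:Int) ∣ x := dvd_trans (by omega) hdvx
          omega
        · exact h
      have hdp : d ∣ p :=
        (isCoprime_two_of_odd d hdodd).dvd_of_dvd_mul_left (by rwa [hn2p] at hdvn)
      have hdp' : d.toNat ∣ n.toNat / 2 := by
        have h1 : ((d.toNat : Int)) ∣ ((n.toNat / 2 : Nat) : Int) := by
          rw [Int.toNat_of_nonneg (by omega : (0:Int) ≤ d), hpcast]
          exact hdp
        exact_mod_cast h1
      rcases Nat.Prime.eq_one_or_self_of_dvd hp d.toNat hdp' with h | h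
      · omega
      · have hdpeq : d = p := by omega
        subst hdpeq
        obtain ⟨k, hk⟩ := hdvx
        have hk2 : 2 ≤ k := by nlinarith
        nlinarith
    · decide
  rw [hAnone]
  -- B finds a hit (p qualifies), and any hit is ≥ 2
  have hpB : (fun i => decide (1 < gcdI i n)
      && (!(PySem.Int.mod i 2 == 0) || (2:Int) == 1)) p = true := by
    obtain ⟨hg0, hgp, hgn, hgd⟩ := gcdI_props p n (by omega) (by omega)
    have hpg : p ∣ gcdI p n := hgd p (dvd_refl p) ⟨2, by omega⟩
    have hgeq : gcdI p n = p := Int.dvd_antisymm hg0 (by omega) hgp hpg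
    simp only [Bool.and_eq_true, decide_eq_true_eq, Bool.or_eq_true, Bool.not_eq_true',
      beq_eq_false_iff_ne]
    refine ⟨by omega, Or.inl ?_⟩
    rw [PySem.Int.mod_eq_emod_of_pos (by norm_num : (0:Int) < 2)]
    omega
  have hsome : ((PySem.List.pyRange 2 n 1).reverse.find?
      (fun i => decide (1 < gcdI i n)
        && (!(PySem.Int.mod i 2 == 0) || (2:Int) == 1))).isSome := by
    apply List.find?_isSome.mpr
    exact ⟨p, List.mem_reverse.mpr ((PySem.List.mem_pyRange_one).mpr ⟨by omega, by omega⟩), hpB⟩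
  obtain ⟨y, hy⟩ := Option.isSome_iff_exists.mp hsome
  have hymem := List.mem_reverse.mp (List.mem_of_find?_eq_some hy)
  obtain ⟨hy2, _⟩ := (PySem.List.mem_pyRange_one).mp hymem
  rw [hy]
  simp only [Option.getD_none, Option.getD_some, mul_zero]
  intro heq
  have : 0 < digitsB n.toNat n * y := mul_pos hdigpos (by omega)
  omega
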